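-- pv_equiv track=rewrite | github.com/JohannaUlveklint/testing_ci | string_ops.py | translate_to_robber
-- ===== SOURCE A (Python) =====
-- def translate_to_robber(text):
--     vowels = 'aeiouy'
--     robber_str = ''
--
--     for c in text:
--         if c not in vowels and c.isalpha():
--             robber_str += c + 'o' + c
--         else:
--             robber_str += c
--
--     return robber_str
-- ===== SOURCE B (Python) =====
-- def translate_to_robber(text):
--     # Divide-and-conquer: robber translation is a string homomorphism, so we
--     # translate each half independently and concatenate.
--     n = len(text)
--     if n == 0:
--         return ''
--     if n == 1:
--         return text + 'o' + text if text not in 'aeiouy' and text.isalpha() else text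
--     mid = n // 2
--     return translate_to_robber(text[:mid]) + translate_to_robber(text[mid:])
-- ===== Notes on version B (the rewrite author's own statement) =====
-- stated objective: alternative
-- what changed: B replaces A's single-pass accumulator loop with divide-and-conquer recursion: the string is split in half, each half translated recursively, and the results concatenated, with a one-character base case; this is correct because the translation is a per-character homomorphism.
import Mathlib
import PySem

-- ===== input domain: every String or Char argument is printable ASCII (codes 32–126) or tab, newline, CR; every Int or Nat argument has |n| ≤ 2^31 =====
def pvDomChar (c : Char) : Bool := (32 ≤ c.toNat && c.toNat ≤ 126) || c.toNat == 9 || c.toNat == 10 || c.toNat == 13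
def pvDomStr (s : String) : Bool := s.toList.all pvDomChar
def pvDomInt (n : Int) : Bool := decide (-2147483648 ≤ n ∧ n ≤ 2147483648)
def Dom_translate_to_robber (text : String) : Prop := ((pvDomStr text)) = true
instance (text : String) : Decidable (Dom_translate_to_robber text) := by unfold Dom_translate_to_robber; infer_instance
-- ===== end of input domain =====

-- B translates by divide-and-conquer recursion on string halves instead of A's
-- single-pass accumulator loop; objective: alternative (same result, different structure).

-- ===== PORT A =====
-- 'c not in vowels' on a single char is exactly char membership in "aeiouy"
def translate_to_robber (text : String) : String :=
  String.ofList (text.toList.foldl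
    (fun acc c =>
      if !("aeiouy".toList.contains c) && PySem.Chars.isalpha c then
        acc ++ [c, 'o', c]
      else
        acc ++ [c]) [])

-- ===== PORT B =====
-- Source B's recursion on List Char; text[:mid] / text[mid:] with 0 ≤ mid ≤ n are
-- exactly take/drop. The one-char base case tests 'text not in "aeiouy" and text.isalpha()'.
def robberGo (cs : List Char) : List Char :=
  match cs with
  | [] => []
  | [c] => if !("aeiouy".toList.contains c) && PySem.Chars.isalpha c then [c, 'o', c] else [c]
  | c1 :: c2 :: rest =>
    let mid := (c1 :: c2 :: rest).length / 2
    robberGo ((c1 :: c2 :: rest).take mid) ++ robberGo ((c1 :: c2 :: rest).drop mid)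
termination_by cs.length
decreasing_by
  · simp only [List.length_take, List.length_cons]; omega
  · simp only [List.length_drop, List.length_cons]; omega

def translate_to_robber_alt (text : String) : String :=
  String.ofList (robberGo text.toList)

-- ===== PRECONDITION & SPEC =====
def Spec_translate_to_robber (text : String) (out : String) : Prop := out = translate_to_robber_alt text
instance (text : String) (out : String) : Decidable (Spec_translate_to_robber text out) := by unfold Spec_translate_to_robber; infer_instance

-- ===== CLAIM (what is proved, stated in full; the proofs are below) =====
def Claim_equal_translate_to_robber : Prop := ∀ (text : String), Dom_translate_to_robber text → Spec_translate_to_robber text (translate_to_robber text)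

-- ===== LEMMAS AND PROOFS =====

def robberPiece (c : Char) : List Char :=
  if !("aeiouy".toList.contains c) && PySem.Chars.isalpha c then [c, 'o', c] else [c]

-- A's accumulator loop with a conditional append IS a flatMap
theorem foldl_append_ite (p : Char → Bool) (f g : Char → List Char)
    (cs : List Char) (acc : List Char) :
    cs.foldl (fun acc c => if p c then acc ++ f c else acc ++ g c) acc =
    acc ++ cs.flatMap (fun c => if p c then f c else g c) := by
  induction cs generalizing acc with
  | nil => simp
  | cons x xs ih =>
    rw [List.foldl_cons, ih, List.flatMap_cons]
    by_cases hp : p x = true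
    · rw [if_pos hp, if_pos hp, List.append_assoc]
    · rw [if_neg hp, if_neg hp, List.append_assoc]

-- the divide-and-conquer recursion computes the per-character homomorphism
theorem robberGo_eq_flatMap (cs : List Char) : robberGo cs = cs.flatMap robberPiece := by
  induction cs using robberGo.induct with
  | case1 => simp [robberGo]
  | case2 c h => simp [robberGo, robberPiece]
  | case3 c h => simp [robberGo, robberPiece]
  | case4 c1 c2 rest mid ih1 ih2 =>
    rw [robberGo]
    simp only at ih1 ih2
    rw [ih1, ih2, ← List.flatMap_append, List.take_append_drop]

-- ===== VERDICT (by name: the statement is the Claim_ definition above) =====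
theorem translate_to_robber_spec : Claim_equal_translate_to_robber := by
  intro text _
  show translate_to_robber text = translate_to_robber_alt text
  unfold translate_to_robber translate_to_robber_alt
  congr 1
  rw [foldl_append_ite (fun c => !("aeiouy".toList.contains c) && PySem.Chars.isalpha c)
      (fun c => [c, 'o', c]) (fun c => [c]) text.toList [], List.nil_append,
      robberGo_eq_flatMap]
  rfl
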